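-- pv_equiv track=rewrite | github.com/sidk03/advent24 | day2/main.py | violation_idx
-- ===== SOURCE A (Python) =====
-- def violation_idx(l: list[int]):
--     inc, dec = False, False
--     for i in range(1, len(l)):
--         if l[i] > l[i - 1]:
--             inc = True
--         else:
--             dec = True
--         if (inc and dec) or not (1 <= abs(l[i] - l[i - 1]) <= 3):
--             return i
--
--     return -1
-- ===== SOURCE B (Python) =====
-- def violation_idx(l: list[int]):
--     n = len(l)
--     bad = next((i for i in range(1, n) if not 1 <= abs(l[i] - l[i - 1]) <= 3), None)
--     flip = None
--     if n >= 2: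
--         first_up = l[1] > l[0]
--         flip = next((i for i in range(2, n) if (l[i] > l[i - 1]) != first_up), None)
--     cands = [x for x in (bad, flip) if x is not None]
--     return min(cands) if cands else -1
-- ===== Notes on version B (the rewrite author's own statement) =====
-- stated objective: alternative
-- what changed: Replaces the single fused scan with inc/dec flags by two independent first-violation searches (first bad gap, first direction flip relative to the first pair) combined by min with none-as-infinity.
import Mathlib
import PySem

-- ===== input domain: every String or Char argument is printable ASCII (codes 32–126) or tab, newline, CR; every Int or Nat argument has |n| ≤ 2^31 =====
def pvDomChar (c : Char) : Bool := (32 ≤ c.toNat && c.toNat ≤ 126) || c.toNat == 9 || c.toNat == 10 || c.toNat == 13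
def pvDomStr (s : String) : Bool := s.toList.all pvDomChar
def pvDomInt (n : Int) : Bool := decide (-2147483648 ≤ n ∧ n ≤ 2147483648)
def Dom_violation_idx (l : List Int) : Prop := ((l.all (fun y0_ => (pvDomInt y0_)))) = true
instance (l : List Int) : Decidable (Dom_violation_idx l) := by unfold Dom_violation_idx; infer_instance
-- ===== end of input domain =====

-- B replaces A's single fused scan with inc/dec flags by two independent
-- first-violation searches (first bad gap, first direction flip) combined by min
-- with none-as-infinity; same cost, different decomposition (objective: alternative).


-- ===== PORT A =====
-- A's loop over range(1, len(l)): structural recursion over the tail, carrying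
-- the previous element, the Python index i and the inc/dec flags.
def vgoA (prev : Int) (rest : List Int) (i : Int) (inc dec : Bool) : Int :=
  match rest with
  | [] => -1
  | x :: xs =>
    let inc' := if x > prev then true else inc
    let dec' := if x > prev then dec else true
    if (inc' && dec') = true ∨ ¬ (1 ≤ |x - prev| ∧ |x - prev| ≤ 3) then i
    else vgoA x xs (i + 1) inc' dec'

def violation_idx (l : List Int) : Int :=
  match l with
  | [] => -1
  | a :: rest => vgoA a rest 1 false false

-- ===== PORT B =====
-- first index i (counting from the given i) whose gap |x - prev| is not in 1..3
def firstBadGap (prev : Int) (rest : List Int) (i : Int) : Option Int :=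
  match rest with
  | [] => none
  | x :: xs =>
    if ¬ (1 ≤ |x - prev| ∧ |x - prev| ≤ 3) then some i else firstBadGap x xs (i + 1)

-- first index i whose direction (x > prev) differs from the first pair's direction
def firstFlip (up : Bool) (prev : Int) (rest : List Int) (i : Int) : Option Int :=
  match rest with
  | [] => none
  | x :: xs =>
    if decide (x > prev) ≠ up then some i else firstFlip up x xs (i + 1)

-- min of the found indices, none = infinity, both none = -1
def combineIdx (o₁ o₂ : Option Int) : Int :=
  match o₁, o₂ with
  | none, none => -1
  | some x, none => x
  | none, some y => y
  | some x, some y => min x y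

def violation_idx_alt (l : List Int) : Int :=
  match l with
  | [] => -1
  | [_] => -1
  | a :: b :: rest =>
    combineIdx (firstBadGap a (b :: rest) 1)
               (firstFlip (decide (b > a)) b rest 2)

-- ===== PRECONDITION & SPEC =====
def Spec_violation_idx (l : List Int) (out : Int) : Prop := out = violation_idx_alt l
instance (l : List Int) (out : Int) : Decidable (Spec_violation_idx l out) := by unfold Spec_violation_idx; infer_instance

-- ===== CLAIM (what is proved, stated in full; the proofs are below) =====
def Claim_equal_violation_idx : Prop := ∀ (l : List Int), Dom_violation_idx l → Spec_violation_idx l (violation_idx l)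

-- ===== LEMMAS AND PROOFS =====

lemma firstBadGap_ge (prev : Int) (rest : List Int) (i j : Int)
    (h : firstBadGap prev rest i = some j) : i ≤ j := by
  induction rest generalizing prev i with
  | nil => simp [firstBadGap] at h
  | cons x xs ih =>
    simp only [firstBadGap] at h
    split at h
    · cases h; exact le_refl _
    · have := ih x (i + 1) h; omega

lemma firstFlip_ge (up : Bool) (prev : Int) (rest : List Int) (i j : Int)
    (h : firstFlip up prev rest i = some j) : i ≤ j := by
  induction rest generalizing prev i with
  | nil => simp [firstFlip] at h
  | cons x xs ih =>
    simp only [firstFlip] at h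
    split at h
    · cases h; exact le_refl _
    · have := ih x (i + 1) h; omega

-- Core invariant: once the flags are (up, !up), A's fused loop equals the min of
-- the two independent searches.
lemma vgoA_eq_combine (rest : List Int) (prev : Int) (i : Int) (up : Bool) :
    vgoA prev rest i up (!up) =
      combineIdx (firstBadGap prev rest i) (firstFlip up prev rest i) := by
  induction rest generalizing prev i up with
  | nil => simp [vgoA, firstBadGap, firstFlip, combineIdx]
  | cons x xs ih =>
    simp only [vgoA, firstBadGap, firstFlip]
    by_cases hd : x > prev
    · -- direction up
      by_cases hup : up = true
      · subst hup
        -- flags stay (true, false); no flip here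
        simp only [if_pos hd, Bool.not_true, Bool.and_false, decide_eq_true hd]
        by_cases hg : 1 ≤ |x - prev| ∧ |x - prev| ≤ 3
        · simp only [if_neg (by simp [hg] : ¬((false : Bool) = true ∨ ¬(1 ≤ |x - prev| ∧ |x - prev| ≤ 3))),
            if_neg (not_not_intro hg), if_neg (by simp : ¬(true ≠ true))]
          exact ih x (i + 1) true
        · simp only [if_pos (Or.inr hg), if_pos hg, if_neg (by simp : ¬(true ≠ true))]
          rcases h2 : firstFlip true x xs (i + 1) with _ | j
          · simp [combineIdx]
          · have := firstFlip_ge true x xs (i + 1) j h2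
            simp [combineIdx]; omega
      · -- up = false, direction is up: flip at i
        have hup' : up = false := by cases up <;> simp_all
        subst hup'
        simp only [if_pos hd, Bool.not_false, Bool.and_true, decide_eq_true hd]
        simp only [if_pos (by simp : (true : Bool) ≠ false)]
        by_cases hg : 1 ≤ |x - prev| ∧ |x - prev| ≤ 3
        · simp only [if_neg (not_not_intro hg)]
          rcases h1 : firstBadGap x xs (i + 1) with _ | j
          · simp [combineIdx]
          · have := firstBadGap_ge x xs (i + 1) j h1
            simp [combineIdx]; omega
        · simp only [if_pos hg, combineIdx]; omega
    · -- direction not up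
      by_cases hup : up = true
      · -- flip at i
        subst hup
        simp only [if_neg hd, Bool.and_true, decide_eq_false hd]
        simp only [if_pos (by simp : (false : Bool) ≠ true)]
        by_cases hg : 1 ≤ |x - prev| ∧ |x - prev| ≤ 3
        · simp only [if_neg (not_not_intro hg)]
          rcases h1 : firstBadGap x xs (i + 1) with _ | j
          · simp [combineIdx]
          · have := firstBadGap_ge x xs (i + 1) j h1
            simp [combineIdx]; omega
        · simp only [if_pos hg, combineIdx]; omega
      · have hup' : up = false := by cases up <;> simp_all
        subst hup'
        simp only [if_neg hd, Bool.and_true, Bool.not_false, decide_eq_false hd]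
        by_cases hg : 1 ≤ |x - prev| ∧ |x - prev| ≤ 3
        · simp only [if_neg (by simp [hg] : ¬((false : Bool) = true ∨ ¬(1 ≤ |x - prev| ∧ |x - prev| ≤ 3))),
            if_neg (not_not_intro hg), if_neg (by simp : ¬(false ≠ false))]
          exact ih x (i + 1) false
        · simp only [if_pos (Or.inr hg), if_pos hg, if_neg (by simp : ¬(false ≠ false))]
          rcases h2 : firstFlip false x xs (i + 1) with _ | j
          · simp [combineIdx]
          · have := firstFlip_ge false x xs (i + 1) j h2
            simp [combineIdx]; omega

lemma main_eq (l : List Int) : violation_idx l = violation_idx_alt l := by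
  match l with
  | [] => rfl
  | [a] => rfl
  | a :: b :: rest =>
    show vgoA a (b :: rest) 1 false false = _
    simp only [vgoA, violation_idx_alt]
    by_cases hd : b > a
    · simp only [if_pos hd, Bool.and_false]
      by_cases hg : 1 ≤ |b - a| ∧ |b - a| ≤ 3
      · simp only [if_neg (by simp [hg] : ¬((false : Bool) = true ∨ ¬(1 ≤ |b - a| ∧ |b - a| ≤ 3)))]
        rw [show (false : Bool) = !true from rfl, vgoA_eq_combine]
        simp only [firstBadGap, if_neg (not_not_intro hg), decide_eq_true hd]
        norm_num
      · simp only [if_pos (Or.inr hg)]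
        simp only [firstBadGap, if_pos hg]
        rcases h2 : firstFlip (decide (b > a)) b rest 2 with _ | j
        · simp [combineIdx]
        · have := firstFlip_ge (decide (b > a)) b rest 2 j h2
          simp [combineIdx]; omega
    · simp only [if_neg hd, Bool.false_and]
      by_cases hg : 1 ≤ |b - a| ∧ |b - a| ≤ 3
      · simp only [if_neg (by simp [hg] : ¬((false : Bool) = true ∨ ¬(1 ≤ |b - a| ∧ |b - a| ≤ 3)))]
        rw [show (true : Bool) = !false from rfl, vgoA_eq_combine]
        simp only [firstBadGap, if_neg (not_not_intro hg), decide_eq_false hd]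
        norm_num
      · simp only [if_pos (Or.inr hg)]
        simp only [firstBadGap, if_pos hg]
        rcases h2 : firstFlip (decide (b > a)) b rest 2 with _ | j
        · simp [combineIdx]
        · have := firstFlip_ge (decide (b > a)) b rest 2 j h2
          simp [combineIdx]; omega

-- ===== VERDICT (by name: the statement is the Claim_ definition above) =====
theorem violation_idx_spec : Claim_equal_violation_idx := by
  intro l _
  unfold Spec_violation_idx
  exact main_eq l
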